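-- pv_equiv track=rewrite | github.com/itsMyrto/3914_thesis | qs.py | build_exponent_matrix
-- ===== SOURCE A (Python) =====
-- def build_exponent_matrix(smooth_numbers: list[int], factor_base: list[int]) -> list[int]:
--     """
--     This function builds the matrix that contains all the exponent vectors (in GF2) of smooth numbers
--     In order to save space and work with large numbers, the binary rows of the matrix are saved as integers.
--
--     :param smooth_numbers: A lists containing all the smooth numbers
--     :param factor_base: A list with all the primes
--     :return: The exponent matrix as a 1D list of integers
--     """
--     smooths = smooth_numbers[::-1]
--     bit_vector = [0] * len(factor_base)
--     pos = 0
--     for p in factor_base: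
--         for smooth_number in smooths:
--             num = smooth_number
--             counter = 0
--             while num % p == 0:
--                 num //= p
--                 counter += 1
--             counter %= 2
--             bit_vector[pos] = bit_vector[pos] << 1
--             bit_vector[pos] = bit_vector[pos] | counter
--         pos += 1
--
--     return bit_vector
-- ===== SOURCE B (Python) =====
-- def _parity(num: int, p: int) -> int:
--     """Parity of the exponent of p in num, via square-lifting: strip p^(2^j)
--     chunks from the top, then a single divisibility test decides the parity."""
--     powers = []
--     pw = p * p
--     while pw <= abs(num):
--         powers.append(pw)
--         pw = pw * pw
--     m = num
--     for pw in reversed(powers):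
--         if m % pw == 0:
--             m //= pw
--     return 1 if m % p == 0 else 0
--
--
-- def build_exponent_matrix(smooth_numbers: list[int], factor_base: list[int]) -> list[int]:
--     rows = [0] * len(factor_base)
--     for k, num in enumerate(smooth_numbers):
--         for i, p in enumerate(factor_base):
--             rows[i] += _parity(num, p) << k
--     return rows
-- ===== Notes on version B (the rewrite author's own statement) =====
-- stated objective: alternative
-- what changed: B computes each exponent parity by square-lifting — it builds the list p^2, p^4, p^8, ... up to |num|, greedily strips those square-power chunks from the largest down, and decides the parity with a single final divisibility test (O(log e) divisions instead of A's e single divisions by p) — and assembles the matrix transposed, per smooth number at bit position k, instead of A's prime-major shift-and-or scan over the reversed smooth list.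
import Mathlib
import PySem

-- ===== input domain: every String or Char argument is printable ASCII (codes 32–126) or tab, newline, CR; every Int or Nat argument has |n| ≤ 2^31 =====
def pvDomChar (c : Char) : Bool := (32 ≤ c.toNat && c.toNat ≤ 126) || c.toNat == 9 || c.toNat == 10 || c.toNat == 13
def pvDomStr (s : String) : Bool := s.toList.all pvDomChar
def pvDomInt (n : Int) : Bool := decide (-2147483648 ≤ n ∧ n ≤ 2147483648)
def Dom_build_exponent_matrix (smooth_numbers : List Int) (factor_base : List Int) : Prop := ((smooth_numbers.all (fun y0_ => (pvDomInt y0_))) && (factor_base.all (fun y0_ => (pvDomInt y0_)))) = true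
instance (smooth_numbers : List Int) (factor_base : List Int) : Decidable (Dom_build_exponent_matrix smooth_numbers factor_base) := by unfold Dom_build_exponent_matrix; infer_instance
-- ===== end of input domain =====

-- B replaces A's algorithm for each matrix entry: instead of counting single divisions by p one at
-- a time (A's while-loop) it extracts the exponent parity by square-lifting — strip p^(2^j) chunks
-- from the largest square power down, then one divisibility test — and assembles the matrix
-- transposed, per smooth number at bit position k (objective: alternative).

-- ===== PORT A =====
-- the `while num % p == 0` loop, fuel-bounded; fuel s.natAbs+1 never runs out on Pre_ inputs
def pvCountLoop (fuel : Nat) (num p counter : Int) : Int :=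
  match fuel with
  | 0 => counter
  | f + 1 =>
      if PySem.Int.mod num p = 0 then
        pvCountLoop f (PySem.Int.floordiv num p) p (counter + 1)
      else counter

def build_exponent_matrix (smooth_numbers : List Int) (factor_base : List Int) : List Int :=
  -- smooths = smooth_numbers[::-1]
  let smooths := (PySem.List.slice? smooth_numbers none none (-1)).getD []
  -- bit_vector = [0] * len(factor_base); pos = 0; the two loops, threading (bit_vector, pos)
  (factor_base.foldl
    (fun (st : List Int × Int) p =>
      let bv := smooths.foldl
        (fun (bv : List Int) (s : Int) =>
          let counter := PySem.Int.mod (pvCountLoop (s.natAbs + 1) s p 0) 2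
          -- bit_vector[pos] = bit_vector[pos] << 1
          let bv1 := PySem.List.pySetD bv st.2 (PySem.List.pyGetD bv st.2 0 <<< (1 : Nat))
          -- bit_vector[pos] = bit_vector[pos] | counter
          PySem.List.pySetD bv1 st.2 (PySem.Int.bor (PySem.List.pyGetD bv1 st.2 0) counter))
        st.1
      (bv, st.2 + 1))
    (List.replicate factor_base.length 0, 0)).1

-- ===== PORT B =====
-- the `while pw <= abs(num): powers.append(pw); pw = pw*pw` loop of _parity, fuel-bounded;
-- fuel num.natAbs+1 never runs out on Pre_ inputs
def pvPowLoop (fuel : Nat) (pw num : Int) : List Int :=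
  match fuel with
  | 0 => []
  | f + 1 =>
      if pw ≤ (num.natAbs : Int) then pw :: pvPowLoop f (pw * pw) num else []

-- _parity: strip p^(2^j) chunks from the top (the `for pw in reversed(powers)` loop), then test
def pvParity (num p : Int) : Int :=
  let powers := pvPowLoop (num.natAbs + 1) (p * p) num
  let m := powers.reverse.foldl
    (fun (m pw : Int) => if PySem.Int.mod m pw = 0 then PySem.Int.floordiv m pw else m) num
  if PySem.Int.mod m p = 0 then 1 else 0

def build_exponent_matrix_alt (smooth_numbers : List Int) (factor_base : List Int) : List Int :=
  (PySem.List.enumerate smooth_numbers).foldl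
    (fun (rows : List Int) (kn : Int × Int) =>
      (PySem.List.enumerate factor_base).foldl
        (fun (rows : List Int) (ip : Int × Int) =>
          -- rows[i] += _parity(num, p) << k   (k = kn.1 from enumerate is ≥ 0, so .toNat is exact)
          PySem.List.pySetD rows ip.1
            (PySem.List.pyGetD rows ip.1 0 + (pvParity kn.2 ip.2 <<< kn.1.toNat)))
        rows)
    (List.replicate factor_base.length 0)

-- ===== PRECONDITION & SPEC =====
-- Pre_ excludes exactly the inputs where Python A never returns: a 0 factor gives ZeroDivisionError,
-- a factor with |p| ≤ 1 or a smooth number 0 makes A's while loop spin forever.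
def Pre_build_exponent_matrix (smooth_numbers : List Int) (factor_base : List Int) : Prop :=
  smooth_numbers = [] ∨ factor_base = [] ∨
    ((∀ p ∈ factor_base, 2 ≤ p.natAbs) ∧ (0 : Int) ∉ smooth_numbers)
instance (smooth_numbers : List Int) (factor_base : List Int) : Decidable (Pre_build_exponent_matrix smooth_numbers factor_base) := by unfold Pre_build_exponent_matrix; infer_instance

def pvWitness_build_exponent_matrix : List Int × List Int := ([15, 2, 21], [2, 3, 5, 7])

def Spec_build_exponent_matrix (smooth_numbers : List Int) (factor_base : List Int) (out : List Int) : Prop := out = build_exponent_matrix_alt smooth_numbers factor_base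
instance (smooth_numbers : List Int) (factor_base : List Int) (out : List Int) : Decidable (Spec_build_exponent_matrix smooth_numbers factor_base out) := by unfold Spec_build_exponent_matrix; infer_instance

-- ===== CLAIM (what is proved, stated in full; the proofs are below) =====
def Claim_equal_build_exponent_matrix : Prop := ∀ (smooth_numbers : List Int) (factor_base : List Int), Dom_build_exponent_matrix smooth_numbers factor_base → Pre_build_exponent_matrix smooth_numbers factor_base → Spec_build_exponent_matrix smooth_numbers factor_base (build_exponent_matrix smooth_numbers factor_base)

-- ===== LEMMAS AND PROOFS =====

-- A's per-cell parity, and the per-row value A computes (bit k = parity of smooth_numbers[k])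
def pvPar (s p : Int) : Int := PySem.Int.mod (pvCountLoop (s.natAbs + 1) s p 0) 2

def pvS : List Int → Int → Int
  | [], _ => 0
  | x :: rest, p => pvPar x p + 2 * pvS rest p

-- B's per-row value, built from B's parity helper
def pvS2 : List Int → Int → Int
  | [], _ => 0
  | x :: rest, p => pvParity x p + 2 * pvS2 rest p

theorem pvPar_mem (s p : Int) : pvPar s p = 0 ∨ pvPar s p = 1 := by
  have h1 := PySem.Int.mod_nonneg (pvCountLoop (s.natAbs + 1) s p 0) (b := 2) (by norm_num)
  have h2 := PySem.Int.mod_lt (pvCountLoop (s.natAbs + 1) s p 0) (b := 2) (by norm_num)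
  unfold pvPar; omega

theorem pvS_nonneg (sm : List Int) (p : Int) : 0 ≤ pvS sm p := by
  induction sm with
  | nil => simp [pvS]
  | cons x rest ih =>
      have := pvPar_mem x p
      simp only [pvS]
      omega

theorem two_mul_lor_one (a : Nat) : 2 * a ||| 1 = 2 * a + 1 := by
  have h := Nat.lor_bit false a true 0
  simpa [Nat.bit] using h

theorem bor_shift (r c : Int) (hr : 0 ≤ r) (hc : c = 0 ∨ c = 1) :
    PySem.Int.bor (r <<< (1 : Nat)) c = 2 * r + c := by
  obtain ⟨a, rfl⟩ := Int.eq_ofNat_of_zero_le hr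
  rw [Int.shiftLeft_eq]
  rcases hc with rfl | rfl
  · rw [PySem.Int.bor_zero]; ring
  · have h2 : ((a : Int) * 2 ^ 1) = ((2 * a : Nat) : Int) := by push_cast; ring
    have h1 : (1 : Int) = ((1 : Nat) : Int) := rfl
    rw [h2, h1, PySem.Int.bor_natCast, two_mul_lor_one]
    push_cast; ring

-- A's inner loop over one row: shift-and-or over the reversed list builds pvS
theorem rowA (p : Int) : ∀ (sm : List Int) (r : Int), 0 ≤ r →
    sm.reverse.foldl
      (fun (r s : Int) =>
        PySem.Int.bor (r <<< (1 : Nat)) (PySem.Int.mod (pvCountLoop (s.natAbs + 1) s p 0) 2))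
      r
      = r * 2 ^ sm.length + pvS sm p := by
  intro sm
  induction sm with
  | nil => intro r hr; simp [pvS]
  | cons x rest ih =>
      intro r hr
      simp only [List.reverse_cons, List.foldl_append, List.foldl_cons, List.foldl_nil]
      rw [ih r hr]
      have hS := pvS_nonneg rest p
      have hp2 : (0 : Int) ≤ r * 2 ^ rest.length := by positivity
      rw [show PySem.Int.mod (pvCountLoop (x.natAbs + 1) x p 0) 2 = pvPar x p from rfl]
      rw [bor_shift _ _ (by omega) (pvPar_mem x p)]
      simp only [pvS, List.length_cons, pow_succ]
      ring

-- folding two per-cell writes threads only that cell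
theorem fold_twoSet {α : Type} (f1 f2 : Int → α → Int) :
    ∀ (l : List α) (bv : List Int) (j : Nat), j < bv.length →
    l.foldl
      (fun bv s =>
        let bv1 := bv.set j (f1 (bv.getD j 0) s)
        bv1.set j (f2 (bv1.getD j 0) s))
      bv
      = bv.set j (l.foldl (fun r s => f2 (f1 r s) s) (bv.getD j 0)) := by
  intro l
  induction l with
  | nil =>
      intro bv j h
      simp only [List.foldl_nil]
      rw [List.getD_eq_getElem bv 0 h, List.set_getElem_self]
  | cons a l ih =>
      intro bv j h
      simp only [List.foldl_cons]
      have hg : ∀ (v : Int), (bv.set j v).getD j 0 = v := by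
        intro v
        rw [List.getD_eq_getElem _ 0 (by simpa using h), List.getElem_set_self]
      rw [hg, List.set_set, ih _ j (by simpa using h), hg, List.set_set]

theorem set_append_length (l1 l2 : List Int) (x v : Int) :
    (l1 ++ x :: l2).set l1.length v = l1 ++ v :: l2 := by
  induction l1 with
  | nil => simp
  | cons a l ih => simp [ih]

theorem getD_append_length (l1 l2 : List Int) (x d : Int) :
    (l1 ++ x :: l2).getD l1.length d = x := by
  simp [List.getD_eq_getElem?_getD]

-- A's outer loop fills the positions left to right
theorem outerA (sm : List Int) : ∀ (fb : List Int) (done : List Int),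
    ((fb.foldl
      (fun (st : List Int × Int) p =>
        let bv := sm.reverse.foldl
          (fun (bv : List Int) (s : Int) =>
            let counter := PySem.Int.mod (pvCountLoop (s.natAbs + 1) s p 0) 2
            let bv1 := PySem.List.pySetD bv st.2 (PySem.List.pyGetD bv st.2 0 <<< (1 : Nat))
            PySem.List.pySetD bv1 st.2 (PySem.Int.bor (PySem.List.pyGetD bv1 st.2 0) counter))
          st.1
        (bv, st.2 + 1))
      (done ++ List.replicate fb.length 0, (done.length : Int))).1)
      = done ++ fb.map (fun p => pvS sm p) := by
  intro fb
  induction fb with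
  | nil => intro done; simp
  | cons p fb ih =>
      intro done
      simp only [List.foldl_cons, List.length_cons, List.replicate_succ,
        PySem.List.pySetD_natCast, PySem.List.pyGetD_natCast]
      rw [fold_twoSet (fun r _ => r <<< (1 : Nat))
            (fun r s => PySem.Int.bor r (PySem.Int.mod (pvCountLoop (s.natAbs + 1) s p 0) 2))
            sm.reverse _ done.length (by simp)]
      rw [getD_append_length, rowA p sm 0 le_rfl, set_append_length]
      have hcast : ((done.length : Int) + 1)
          = (((done ++ [(0 : Int) * 2 ^ sm.length + pvS sm p]).length : Nat) : Int) := by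
        simp
      rw [hcast, List.append_cons done _ (List.replicate fb.length 0), ih]
      simp

theorem A_eq_map (sm fb : List Int) :
    build_exponent_matrix sm fb = fb.map (fun p => pvS sm p) := by
  have h := outerA sm fb []
  simpa [build_exponent_matrix, PySem.List.slice?_none_none_neg_one] using h

-- B's inner loop adds the shifted parity bit into each row once
theorem innerB (num : Int) (k : Nat) : ∀ (fb : List Int) (pre rest : List Int),
    fb.length ≤ rest.length →
    (PySem.List.enumerate fb (pre.length : Int)).foldl
      (fun (rows : List Int) (ip : Int × Int) =>
        PySem.List.pySetD rows ip.1 (PySem.List.pyGetD rows ip.1 0 + (pvParity num ip.2 <<< k)))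
      (pre ++ rest)
    = pre ++ (List.zipWith (fun (r p : Int) => r + (pvParity num p <<< k)) rest fb
        ++ rest.drop fb.length) := by
  intro fb
  induction fb with
  | nil => intro pre rest _; simp [PySem.List.enumerate]
  | cons p fb ih =>
      intro pre rest hlen
      cases rest with
      | nil => simp at hlen
      | cons r rest =>
          simp only [PySem.List.enumerate_cons, List.foldl_cons, PySem.List.pySetD_natCast,
            PySem.List.pyGetD_natCast]
          rw [getD_append_length, set_append_length]
          have hcast : ((pre.length : Int) + 1)
              = (((pre ++ [r + (pvParity num p <<< k)]).length : Nat) : Int) := by simp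
          rw [hcast, List.append_cons pre _ rest, ih _ rest (by simpa using hlen)]
          simp

theorem zipWith_zipWith {α : Type} (f g : Int → α → Int) :
    ∀ (rows : List Int) (fb : List α),
    List.zipWith g (List.zipWith f rows fb) fb
      = List.zipWith (fun r p => g (f r p) p) rows fb := by
  intro rows
  induction rows with
  | nil => intro fb; simp
  | cons r rows ih =>
      intro fb
      cases fb with
      | nil => simp
      | cons p fb => simp [ih]

theorem zipWith_const_left (rows fb : List Int) (h : rows.length = fb.length) :
    List.zipWith (fun (r : Int) (_ : Int) => r) rows fb = rows := by
  induction rows generalizing fb with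
  | nil => simp
  | cons r rows ih =>
      cases fb with
      | nil => simp at h
      | cons p fb => simp [ih fb (by simpa using h)]

-- B's outer loop: each processed number adds its parity bits at the next bit position
theorem outerB (fb : List Int) : ∀ (sm : List Int) (k : Nat) (rows : List Int),
    rows.length = fb.length →
    (PySem.List.enumerate sm (k : Int)).foldl
      (fun (rows : List Int) (kn : Int × Int) =>
        (PySem.List.enumerate fb).foldl
          (fun (rows : List Int) (ip : Int × Int) =>
            PySem.List.pySetD rows ip.1
              (PySem.List.pyGetD rows ip.1 0 + (pvParity kn.2 ip.2 <<< kn.1.toNat)))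
          rows)
      rows
    = List.zipWith (fun r p => r + 2 ^ k * pvS2 sm p) rows fb := by
  intro sm
  induction sm with
  | nil =>
      intro k rows h
      simp only [PySem.List.enumerate, List.foldl_nil, pvS2, mul_zero, add_zero]
      exact (zipWith_const_left rows fb h).symm
  | cons x sm ih =>
      intro k rows h
      simp only [PySem.List.enumerate_cons, List.foldl_cons, Int.toNat_natCast]
      have hi := innerB x k fb [] rows (by omega)
      simp only [List.length_nil, Nat.cast_zero, List.nil_append] at hi
      rw [hi]
      have hdrop : rows.drop fb.length = [] := by rw [← h, List.drop_length]
      rw [hdrop, List.append_nil]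
      have hcast : ((k : Int) + 1) = (((k + 1 : Nat)) : Int) := by push_cast; ring
      have hlen : (List.zipWith (fun (r p : Int) => r + (pvParity x p <<< k)) rows fb).length
          = fb.length := by simp [h]
      rw [hcast, ih (k + 1) _ hlen, zipWith_zipWith]
      have hfun : (fun (r : Int) (p : Int) => (r + (pvParity x p <<< k)) + 2 ^ (k + 1) * pvS2 sm p)
          = (fun (r : Int) (p : Int) => r + 2 ^ k * pvS2 (x :: sm) p) := by
        funext r p
        rw [Int.shiftLeft_eq]
        simp only [pvS2, pow_succ]
        ring
      rw [hfun]

theorem zipWith_replicate_left (fb : List Int) (c : Int) (f : Int → Int → Int) :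
    List.zipWith f (List.replicate fb.length c) fb = fb.map (f c) := by
  induction fb with
  | nil => simp
  | cons p fb ih => simp [List.replicate_succ, ih]

theorem B_eq_map (sm fb : List Int) :
    build_exponent_matrix_alt sm fb = fb.map (fun p => pvS2 sm p) := by
  unfold build_exponent_matrix_alt
  have hB := outerB fb sm 0 (List.replicate fb.length 0) (by simp)
  simp only [Nat.cast_zero, pow_zero, one_mul] at hB
  rw [hB, zipWith_replicate_left]
  simp

-- ===== the valuation theory linking the two parity algorithms =====

-- number of times q divides a (0 for q < 2 or a = 0)
def pvValN (q a : Nat) : Nat :=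
  if h : 2 ≤ q ∧ 0 < a ∧ q ∣ a then pvValN q (a / q) + 1 else 0
  termination_by a
  decreasing_by exact Nat.div_lt_self h.2.1 (by omega)

theorem pvValN_zero (q a : Nat) (h : ¬(2 ≤ q ∧ 0 < a ∧ q ∣ a)) : pvValN q a = 0 := by
  rw [pvValN]; exact dif_neg h

theorem pvValN_succ (q a : Nat) (hq : 2 ≤ q) (ha : 0 < a) (hd : q ∣ a) :
    pvValN q a = pvValN q (a / q) + 1 := by
  rw [pvValN]; exact dif_pos ⟨hq, ha, hd⟩

theorem pow_pvValN_dvd (q : Nat) (hq : 2 ≤ q) : ∀ a, 0 < a → q ^ pvValN q a ∣ a := by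
  intro a
  induction a using Nat.strong_induction_on with
  | _ a ih =>
      intro ha
      by_cases hd : q ∣ a
      · obtain ⟨t, rfl⟩ := hd
        have ht : 0 < t := Nat.pos_of_ne_zero (by rintro rfl; simp at ha)
        have hdiv : q * t / q = t := Nat.mul_div_cancel_left t (by omega)
        rw [pvValN_succ q (q * t) hq ha ⟨t, rfl⟩, hdiv, pow_succ']
        exact mul_dvd_mul_left q (ih t (by nlinarith) ht)
      · rw [pvValN_zero q a (by tauto)]; simp

theorem not_dvd_pow_succ (q : Nat) (hq : 2 ≤ q) : ∀ a, 0 < a → ¬ q ^ (pvValN q a + 1) ∣ a := by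
  intro a
  induction a using Nat.strong_induction_on with
  | _ a ih =>
      intro ha hcon
      by_cases hd : q ∣ a
      · obtain ⟨t, rfl⟩ := hd
        have ht : 0 < t := Nat.pos_of_ne_zero (by rintro rfl; simp at ha)
        have hdiv : q * t / q = t := Nat.mul_div_cancel_left t (by omega)
        rw [pvValN_succ q (q * t) hq ha ⟨t, rfl⟩, hdiv, pow_succ'] at hcon
        exact ih t (by nlinarith) ht ((mul_dvd_mul_iff_left (by omega : q ≠ 0)).mp hcon)
      · rw [pvValN_zero q a (by tauto), zero_add, pow_one] at hcon
        exact hd hcon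

theorem pow_dvd_iff (q a k : Nat) (hq : 2 ≤ q) (ha : 0 < a) :
    q ^ k ∣ a ↔ k ≤ pvValN q a := by
  constructor
  · intro h
    by_contra hk
    push_neg at hk
    exact not_dvd_pow_succ q hq a ha ((pow_dvd_pow q (by omega)).trans h)
  · intro h
    exact (pow_dvd_pow q h).trans (pow_pvValN_dvd q hq a ha)

theorem pvValN_mul_pow (q b : Nat) (hq : 2 ≤ q) (hb : 0 < b) :
    ∀ k, pvValN q (q ^ k * b) = k + pvValN q b := by
  intro k
  induction k with
  | zero => simp
  | succ k ih =>
      have he : q ^ (k + 1) * b = q * (q ^ k * b) := by ring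
      have hpos : 0 < q * (q ^ k * b) := by positivity
      rw [he, pvValN_succ q _ hq hpos (dvd_mul_right _ _),
        Nat.mul_div_cancel_left _ (by omega : 0 < q), ih]
      omega

theorem pvValN_div_pow (q a k : Nat) (hq : 2 ≤ q) (ha : 0 < a) (hd : q ^ k ∣ a) :
    pvValN q (a / q ^ k) = pvValN q a - k := by
  obtain ⟨b, rfl⟩ := hd
  have hb : 0 < b := Nat.pos_of_ne_zero (by rintro rfl; simp at ha)
  rw [Nat.mul_div_cancel_left b (by positivity : 0 < q ^ k), pvValN_mul_pow q b hq hb k]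
  omega

-- exact Python floor division when the divisor divides
theorem floordiv_exact (n p : Int) (hp : p ≠ 0) (hd : p ∣ n) :
    PySem.Int.floordiv n p = n / p := by
  have h := PySem.Int.floordiv_mul_add_mod n p
  have hm : PySem.Int.mod n p = 0 := (PySem.Int.mod_eq_zero_iff_dvd n p).mpr hd
  rw [hm, add_zero] at h
  have h2 := Int.mul_ediv_cancel (PySem.Int.floordiv n p) hp
  rw [h] at h2
  exact h2.symm

-- A's counting loop computes the valuation
theorem countA (p : Int) (hq : 2 ≤ p.natAbs) : ∀ (fuel : Nat) (n c : Int), n ≠ 0 →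
    n.natAbs < fuel →
    pvCountLoop fuel n p c = c + (pvValN p.natAbs n.natAbs : Int) := by
  intro fuel
  induction fuel with
  | zero => intro n c hn h; omega
  | succ f ih =>
      intro n c hn hf
      have hp : p ≠ 0 := by rintro rfl; simp at hq
      simp only [pvCountLoop]
      by_cases hd : p ∣ n
      · rw [if_pos ((PySem.Int.mod_eq_zero_iff_dvd n p).mpr hd), floordiv_exact n p hp hd]
        have hmul : p * (n / p) = n := Int.mul_ediv_cancel' hd
        have ht0 : n / p ≠ 0 := by rintro h0; rw [h0, mul_zero] at hmul; exact hn hmul.symm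
        have hnat : p.natAbs * (n / p).natAbs = n.natAbs := by rw [← Int.natAbs_mul, hmul]
        have h1 : 1 ≤ (n / p).natAbs := Int.natAbs_pos.mpr ht0
        have hlt : (n / p).natAbs < n.natAbs := by nlinarith
        rw [ih (n / p) (c + 1) ht0 (by omega)]
        have hv : pvValN p.natAbs n.natAbs = pvValN p.natAbs (n / p).natAbs + 1 := by
          rw [pvValN_succ p.natAbs n.natAbs hq (Int.natAbs_pos.mpr hn)
            (Int.natAbs_dvd_natAbs.mpr hd), ← hnat,
            Nat.mul_div_cancel_left _ (by omega : 0 < p.natAbs)]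
        rw [hv]
        push_cast
        ring
      · rw [if_neg (fun h => hd ((PySem.Int.mod_eq_zero_iff_dvd n p).mp h))]
        rw [pvValN_zero p.natAbs n.natAbs
          (by rintro ⟨-, -, hdd⟩; exact hd (Int.natAbs_dvd_natAbs.mp hdd))]
        simp

theorem pvPar_eq_val (s p : Int) (hq : 2 ≤ p.natAbs) (hs : s ≠ 0) :
    pvPar s p = ((pvValN p.natAbs s.natAbs % 2 : Nat) : Int) := by
  unfold pvPar
  rw [countA p hq (s.natAbs + 1) s 0 hs (by omega), zero_add,
    PySem.Int.mod_eq_emod_of_pos (by norm_num : (0:Int) < 2)]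
  omega

-- any divisor of n has valuation < K once |n| < q^K
theorem val_bound (p n m : Int) (hq : 2 ≤ p.natAbs) (hn : n ≠ 0) (hm : m ∣ n) (K : Nat)
    (hK : n.natAbs < p.natAbs ^ K) : pvValN p.natAbs m.natAbs < K := by
  have hm0 : m ≠ 0 := by rintro rfl; exact hn (zero_dvd_iff.mp hm)
  have h1 := pow_pvValN_dvd p.natAbs hq m.natAbs (Int.natAbs_pos.mpr hm0)
  have h3 : p.natAbs ^ pvValN p.natAbs m.natAbs ≤ n.natAbs :=
    Nat.le_of_dvd (Int.natAbs_pos.mpr hn) (h1.trans (Int.natAbs_dvd_natAbs.mpr hm))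
  by_contra hcon
  push_neg at hcon
  have := Nat.pow_le_pow_right (by omega : 1 ≤ p.natAbs) hcon
  omega

-- the greedy strip over the square-power list: divides n, keeps parity, ends below 2^(j+1)
theorem strip_spec (p : Int) (hq : 2 ≤ p.natAbs) (n : Int) (hn : n ≠ 0) :
    ∀ (fuel j : Nat) (m : Int), m ∣ n → n.natAbs + 1 ≤ fuel + j →
    ∃ m', ((pvPowLoop fuel ((p * p) ^ (2 ^ j)) n).reverse.foldl
        (fun (m pw : Int) => if PySem.Int.mod m pw = 0 then PySem.Int.floordiv m pw else m) m)
        = m' ∧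
      m' ∣ n ∧ pvValN p.natAbs m'.natAbs % 2 = pvValN p.natAbs m.natAbs % 2 ∧
      pvValN p.natAbs m'.natAbs < 2 ^ (j + 1) := by
  have hpwcast : ∀ i : Nat, ((p * p) ^ (2 ^ i) : Int) = ((p.natAbs ^ (2 ^ (i + 1)) : Nat) : Int) := by
    intro i
    rw [← Int.natAbs_mul_self]
    push_cast
    rw [← pow_two, ← pow_mul]
    congr 1
    rw [pow_succ]
    ring
  intro fuel
  induction fuel with
  | zero =>
      intro j m hm hfuel
      refine ⟨m, by simp [pvPowLoop], hm, rfl, ?_⟩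
      apply val_bound p n m hq hn hm
      have h1 : n.natAbs < j := by omega
      have h2 : j < 2 ^ j := Nat.lt_two_pow_self
      have h3 : 2 ^ j ≤ 2 ^ (2 ^ (j + 1)) := by
        apply Nat.pow_le_pow_right (by omega)
        calc j ≤ 2 ^ j := by omega
          _ ≤ 2 ^ (j + 1) := Nat.pow_le_pow_right (by omega) (by omega)
      have h4 : 2 ^ (2 ^ (j + 1)) ≤ p.natAbs ^ (2 ^ (j + 1)) := Nat.pow_le_pow_left hq _
      omega
  | succ f ih =>
      intro j m hm hfuel
      simp only [pvPowLoop]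
      by_cases hg : ((p * p) ^ (2 ^ j) : Int) ≤ (n.natAbs : Int)
      · rw [if_pos hg]
        have hrec : ((p * p) ^ (2 ^ j) : Int) * (p * p) ^ (2 ^ j) = (p * p) ^ (2 ^ (j + 1)) := by
          rw [← pow_add]
          congr 1
          rw [pow_succ]
          ring
        rw [hrec]
        obtain ⟨m'', hfold, hdvd'', hpar'', hlt''⟩ := ih (j + 1) m hm (by omega)
        rw [List.reverse_cons, List.foldl_append, hfold]
        simp only [List.foldl_cons, List.foldl_nil]
        have hpwc : ((p * p) ^ (2 ^ j) : Int) = ((p.natAbs ^ (2 ^ (j + 1)) : Nat) : Int) :=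
          hpwcast j
        have hQpos : 0 < p.natAbs ^ (2 ^ (j + 1)) := by positivity
        have hpw0 : ((p * p) ^ (2 ^ j) : Int) ≠ 0 := by
          rw [hpwc]
          exact_mod_cast hQpos.ne'
        have hm''0 : m'' ≠ 0 := by rintro rfl; exact hn (zero_dvd_iff.mp hdvd'')
        by_cases hdv : ((p * p) ^ (2 ^ j) : Int) ∣ m''
        · rw [if_pos ((PySem.Int.mod_eq_zero_iff_dvd _ _).mpr hdv),
            floordiv_exact _ _ hpw0 hdv]
          set pw := ((p * p) ^ (2 ^ j) : Int) with hpwdef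
          have hmul : pw * (m'' / pw) = m'' := Int.mul_ediv_cancel' hdv
          have ht0 : m'' / pw ≠ 0 := by
            rintro h0; rw [h0, mul_zero] at hmul; exact hm''0 hmul.symm
          have htdvd : m'' / pw ∣ m'' := ⟨pw, by rw [mul_comm, hmul]⟩
          have hQd : p.natAbs ^ (2 ^ (j + 1)) ∣ m''.natAbs := by
            have h := Int.natAbs_dvd_natAbs.mpr hdv
            rwa [hpwc, Int.natAbs_natCast] at h
          have htn : (m'' / pw).natAbs = m''.natAbs / p.natAbs ^ (2 ^ (j + 1)) := by
            have h := congrArg Int.natAbs hmul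
            rw [Int.natAbs_mul, hpwc, Int.natAbs_natCast] at h
            rw [← h, Nat.mul_div_cancel_left _ hQpos, hpwc]
          have hv : pvValN p.natAbs (m'' / pw).natAbs
              = pvValN p.natAbs m''.natAbs - 2 ^ (j + 1) := by
            rw [htn]
            exact pvValN_div_pow p.natAbs m''.natAbs _ hq (Int.natAbs_pos.mpr hm''0) hQd
          have hge : 2 ^ (j + 1) ≤ pvValN p.natAbs m''.natAbs :=
            (pow_dvd_iff p.natAbs m''.natAbs _ hq (Int.natAbs_pos.mpr hm''0)).mp hQd
          have heven : 2 ^ (j + 1) = 2 * 2 ^ j := by rw [pow_succ]; ring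
          have hsum : 2 ^ (j + 1 + 1) = 2 ^ (j + 1) + 2 ^ (j + 1) := by ring
          exact ⟨m'' / pw, rfl, htdvd.trans hdvd'', by omega, by omega⟩
        · rw [if_neg (fun h => hdv ((PySem.Int.mod_eq_zero_iff_dvd _ _).mp h))]
          refine ⟨m'', rfl, hdvd'', hpar'', ?_⟩
          by_contra hcon
          push_neg at hcon
          have hQd : p.natAbs ^ (2 ^ (j + 1)) ∣ m''.natAbs :=
            (pow_dvd_iff p.natAbs m''.natAbs _ hq (Int.natAbs_pos.mpr hm''0)).mpr hcon
          apply hdv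
          rw [hpwc]
          exact Int.natAbs_dvd_natAbs.mp (by rwa [Int.natAbs_natCast])
      · rw [if_neg hg]
        refine ⟨m, by simp, hm, rfl, ?_⟩
        apply val_bound p n m hq hn hm
        have : ((n.natAbs : Int)) < ((p.natAbs ^ (2 ^ (j + 1)) : Nat) : Int) := by
          rw [← hpwcast j]; omega
        exact_mod_cast this

theorem parityB (num p : Int) (hq : 2 ≤ p.natAbs) (hn : num ≠ 0) :
    pvParity num p = ((pvValN p.natAbs num.natAbs % 2 : Nat) : Int) := by
  obtain ⟨m', hfold, hdvd, hpar, hlt⟩ :=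
    strip_spec p hq num hn (num.natAbs + 1) 0 num dvd_rfl (by omega)
  simp only [pow_zero, pow_one] at hfold hlt
  unfold pvParity
  dsimp only
  rw [hfold]
  have hm'0 : m' ≠ 0 := by rintro rfl; exact hn (zero_dvd_iff.mp hdvd)
  have hiff : PySem.Int.mod m' p = 0 ↔ 1 ≤ pvValN p.natAbs m'.natAbs := by
    rw [PySem.Int.mod_eq_zero_iff_dvd, ← Int.natAbs_dvd_natAbs]
    have h := pow_dvd_iff p.natAbs m'.natAbs 1 hq (Int.natAbs_pos.mpr hm'0)
    rw [pow_one] at h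
    exact h
  by_cases h1 : 1 ≤ pvValN p.natAbs m'.natAbs
  · rw [if_pos (hiff.mpr h1)]
    have : pvValN p.natAbs num.natAbs % 2 = 1 := by omega
    rw [this]
    simp
  · rw [if_neg (fun h => h1 (hiff.mp h))]
    have : pvValN p.natAbs num.natAbs % 2 = 0 := by omega
    rw [this]
    simp

theorem pvS_eq (p : Int) (hq : 2 ≤ p.natAbs) :
    ∀ (sm : List Int), (0 : Int) ∉ sm → pvS2 sm p = pvS sm p := by
  intro sm
  induction sm with
  | nil => intro _; rfl
  | cons x rest ih =>
      intro h0
      have hx : x ≠ 0 := by intro h; exact h0 (by simp [h])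
      simp only [pvS, pvS2, ih (by intro h; exact h0 (List.mem_cons_of_mem _ h))]
      rw [parityB x p hq hx, pvPar_eq_val x p hq hx]

-- ===== VERDICT (by name: the statement is the Claim_ definition above) =====
theorem build_exponent_matrix_spec : Claim_equal_build_exponent_matrix := by
  intro sm fb _ hpre
  unfold Spec_build_exponent_matrix
  rw [A_eq_map, B_eq_map]
  rcases hpre with rfl | rfl | ⟨hfb, hsm⟩
  · exact List.map_congr_left (fun p _ => rfl)
  · rfl
  · exact List.map_congr_left (fun p hp => (pvS_eq p (hfb p hp) sm hsm).symm)
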